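-- pv_equiv track=rewrite | github.com/denkarateev/Aura-backend | main4.py | level_title_for_rating
-- ===== SOURCE A (Python) =====
-- RATING_LEVELS = [
--     (0, "Новичок"),
--     (100, "Миксер"),
--     (300, "Блендер"),
--     (700, "Мастер чаши"),
--     (1500, "Hookah Legend"),
-- ]
--
-- def level_title_for_rating(rating: int) -> str:
--     title = RATING_LEVELS[0][1]
--     for threshold, candidate in RATING_LEVELS:
--         if rating >= threshold:
--             title = candidate
--         else:
--             break
--     return title
-- ===== SOURCE B (Python) =====
-- import bisect
--
-- RATING_LEVELS = [
--     (0, "Новичок"),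
--     (100, "Миксер"),
--     (300, "Блендер"),
--     (700, "Мастер чаши"),
--     (1500, "Hookah Legend"),
-- ]
--
-- _THRESHOLDS = [t for t, _ in RATING_LEVELS]
--
-- def level_title_for_rating(rating: int) -> str:
--     idx = max(0, bisect.bisect_right(_THRESHOLDS, rating) - 1)
--     return RATING_LEVELS[idx][1]
-- ===== Notes on version B (the rewrite author's own statement) =====
-- stated objective: idiomatic
-- what changed: Replaces the accumulate-and-break linear scan over RATING_LEVELS with bisect.bisect_right on the precomputed threshold list, clamping the index with max(0, pos-1) and indexing the table directly.
import Mathlib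
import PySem

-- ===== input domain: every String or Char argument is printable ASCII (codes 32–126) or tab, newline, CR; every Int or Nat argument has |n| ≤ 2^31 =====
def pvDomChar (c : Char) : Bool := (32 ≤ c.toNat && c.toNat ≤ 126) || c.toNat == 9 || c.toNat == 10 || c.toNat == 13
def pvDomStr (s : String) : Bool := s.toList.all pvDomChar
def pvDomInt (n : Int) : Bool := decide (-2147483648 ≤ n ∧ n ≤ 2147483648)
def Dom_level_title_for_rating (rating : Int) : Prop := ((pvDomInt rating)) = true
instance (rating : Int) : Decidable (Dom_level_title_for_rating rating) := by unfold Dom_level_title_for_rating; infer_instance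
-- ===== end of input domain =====

-- B replaces A's accumulate-and-break linear scan by a bisect_right binary search over the
-- precomputed threshold list (objective: idiomatic; same behaviour on every int).

def RATING_LEVELS : List (Int × String) :=
  [(0, "Новичок"), (100, "Миксер"), (300, "Блендер"), (700, "Мастер чаши"), (1500, "Hookah Legend")]

-- ===== PORT A =====
-- the for-loop with break, as structural recursion over the table with the running `title`
def levelLoopA : List (Int × String) → String → Int → String
  | [], title, _ => title
  | (threshold, candidate) :: rest, title, rating =>
      if rating ≥ threshold then levelLoopA rest candidate rating else title

def level_title_for_rating (rating : Int) : String :=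
  levelLoopA RATING_LEVELS (((RATING_LEVELS[0]?).map Prod.snd).getD "") rating

-- ===== PORT B =====
-- bisect.bisect_right, ported as CPython's lo/hi binary search
def bisectRightGo (xs : List Int) (x : Int) (lo hi : Nat) : Nat :=
  if _h : lo < hi then
    let mid := (lo + hi) / 2
    if x < xs.getD mid 0 then bisectRightGo xs x lo mid
    else bisectRightGo xs x (mid + 1) hi
  else lo
termination_by hi - lo
decreasing_by all_goals omega

def bisectRight (xs : List Int) (x : Int) : Nat := bisectRightGo xs x 0 xs.length

def pvThresholds : List Int := RATING_LEVELS.map Prod.fst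

def level_title_for_rating_alt (rating : Int) : String :=
  let idx : Int := max 0 ((bisectRight pvThresholds rating : Int) - 1)
  (((RATING_LEVELS[idx.toNat]?).map Prod.snd).getD "")

-- ===== PRECONDITION & SPEC =====
def Spec_level_title_for_rating (rating : Int) (out : String) : Prop := out = level_title_for_rating_alt rating
instance (rating : Int) (out : String) : Decidable (Spec_level_title_for_rating rating out) := by unfold Spec_level_title_for_rating; infer_instance

-- ===== CLAIM (what is proved, stated in full; the proofs are below) =====
def Claim_equal_level_title_for_rating : Prop := ∀ (rating : Int), Dom_level_title_for_rating rating → Spec_level_title_for_rating rating (level_title_for_rating rating)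

-- ===== LEMMAS AND PROOFS =====

-- ===== VERDICT (by name: the statement is the Claim_ definition above) =====
theorem level_title_for_rating_spec : Claim_equal_level_title_for_rating := by
  intro rating _
  show _ = _
  unfold level_title_for_rating level_title_for_rating_alt bisectRight
  rw [show pvThresholds.length = 5 from rfl]
  unfold bisectRightGo
  unfold bisectRightGo
  unfold bisectRightGo
  unfold bisectRightGo
  simp only [levelLoopA, RATING_LEVELS, pvThresholds, List.map, List.getD, ge_iff_le]
  norm_num
  split_ifs <;> first | rfl | omega
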